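-- pv_equiv track=rewrite | github.com/gukihuman/algorithms-python-hiryanov | Lecture_09_sorts/C.py | how_many_knights
-- ===== SOURCE A (Python) =====
-- def change(n):
--     """Change 1 to 0 and 0 to 1."""
--     if n == 0:
--         n = 1
--         return n
--     n = 0
--     return n
--
-- def how_many_knights(my_list):
--     """Returns the amount of knights on an island."""
--     A = [0]
--     B = [1]
--     for i in range(len(my_list)-1):
--         if my_list[i] == 0:
--             A.append(change(A[i]))
--             B.append(change(B[i]))
--             continue
--         A.append(A[i])
--         B.append(B[i])
--     A_sum = B_sum = 0
--     for i in range(len(A)):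
--         A_sum += A[i]
--         B_sum += B[i]
--     return A_sum if A_sum < B_sum else B_sum
-- ===== SOURCE B (Python) =====
-- def how_many_knights(my_list):
--     """Returns the amount of knights on an island."""
--     n = len(my_list)
--     cur = a_sum = 0
--     for j in range(n):
--         a_sum += cur
--         if j < n - 1 and my_list[j] == 0:
--             cur = 1 - cur
--     return min(a_sum, n - a_sum)
-- ===== Notes on version B (the rewrite author's own statement) =====
-- stated objective: simpler
-- what changed: Replaces the two list-building passes and the summing pass with a single scalar parity scan, using the fact that the B sequence is the exact 0/1-complement of the A sequence so B_sum = len(my_list) - A_sum.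
import Mathlib
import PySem

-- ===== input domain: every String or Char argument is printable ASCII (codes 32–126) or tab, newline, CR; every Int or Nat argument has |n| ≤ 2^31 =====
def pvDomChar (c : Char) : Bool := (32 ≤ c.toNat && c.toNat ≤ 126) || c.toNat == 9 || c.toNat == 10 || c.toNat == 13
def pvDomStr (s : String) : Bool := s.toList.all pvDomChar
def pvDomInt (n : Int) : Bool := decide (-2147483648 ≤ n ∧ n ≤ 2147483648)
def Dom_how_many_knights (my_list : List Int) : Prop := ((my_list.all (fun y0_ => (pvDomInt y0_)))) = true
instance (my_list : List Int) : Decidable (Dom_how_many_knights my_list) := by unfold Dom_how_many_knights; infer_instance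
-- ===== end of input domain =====

-- B replaces A's two complementary 0/1 lists and the summing pass by a single scalar
-- parity scan, using B_sum = len(my_list) - A_sum (objective: simpler).

-- ===== PORT A =====
def change (n : Int) : Int :=
  if n = 0 then 1 else 0

def how_many_knights (my_list : List Int) : Int :=
  -- first loop: build the two flip sequences A, B (indices are always in range,
  -- so the pyGetD default 0 is never used)
  let ab := (List.range (my_list.length - 1)).foldl
    (fun (st : List Int × List Int) (i : Nat) =>
      if PySem.List.pyGetD my_list (i : Int) 0 = 0 then
        (st.1 ++ [change (PySem.List.pyGetD st.1 (i : Int) 0)],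
         st.2 ++ [change (PySem.List.pyGetD st.2 (i : Int) 0)])
      else
        (st.1 ++ [PySem.List.pyGetD st.1 (i : Int) 0],
         st.2 ++ [PySem.List.pyGetD st.2 (i : Int) 0]))
    ([0], [1])
  -- second loop: A_sum, B_sum
  let s := (List.range ab.1.length).foldl
    (fun (s : Int × Int) (i : Nat) =>
      (s.1 + PySem.List.pyGetD ab.1 (i : Int) 0, s.2 + PySem.List.pyGetD ab.2 (i : Int) 0))
    (0, 0)
  if s.1 < s.2 then s.1 else s.2

-- ===== PORT B =====
def how_many_knights_alt (my_list : List Int) : Int :=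
  let n := my_list.length
  let st := (List.range n).foldl
    (fun (st : Int × Int) (j : Nat) =>
      let a_sum := st.2 + st.1
      let cur := if j < n - 1 ∧ PySem.List.pyGetD my_list (j : Int) 0 = 0 then 1 - st.1 else st.1
      (cur, a_sum))
    (0, 0)
  min st.2 ((n : Int) - st.2)

-- ===== PRECONDITION & SPEC =====
def Spec_how_many_knights (my_list : List Int) (out : Int) : Prop := out = how_many_knights_alt my_list
instance (my_list : List Int) (out : Int) : Decidable (Spec_how_many_knights my_list out) := by unfold Spec_how_many_knights; infer_instance

-- ===== CLAIM (what is proved, stated in full; the proofs are below) =====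
def Claim_equal_how_many_knights : Prop := ∀ (my_list : List Int), Dom_how_many_knights my_list → Spec_how_many_knights my_list (how_many_knights my_list)

-- ===== LEMMAS AND PROOFS =====

-- parity of the number of zeros among the first k elements (the value A[k] / cur)
def par (l : List Int) : Nat → Int
  | 0 => 0
  | k + 1 => if l.getD k 0 = 0 then 1 - par l k else par l k

-- sum of par over the first k indices (the value A_sum / a_sum)
def asum (l : List Int) : Nat → Int
  | 0 => 0
  | k + 1 => asum l k + par l k

theorem par01 (l : List Int) (k : Nat) : par l k = 0 ∨ par l k = 1 := by
  induction k with
  | zero => left; rfl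
  | succ k ih =>
    simp only [par]
    split <;> omega

-- the first loop of A builds exactly the par sequence and its 0/1-complement
theorem fold_build (l : List Int) (m : Nat) :
    (List.range m).foldl
      (fun (st : List Int × List Int) (i : Nat) =>
        if PySem.List.pyGetD l (i : Int) 0 = 0 then
          (st.1 ++ [change (PySem.List.pyGetD st.1 (i : Int) 0)],
           st.2 ++ [change (PySem.List.pyGetD st.2 (i : Int) 0)])
        else
          (st.1 ++ [PySem.List.pyGetD st.1 (i : Int) 0],
           st.2 ++ [PySem.List.pyGetD st.2 (i : Int) 0]))
      ([0], [1])
    = ((List.range (m + 1)).map (par l), (List.range (m + 1)).map (fun k => 1 - par l k)) := by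
  induction m with
  | zero => simp [par]
  | succ m ih =>
    rw [List.range_succ (n := m), List.foldl_append, ih]
    simp only [List.foldl_cons, List.foldl_nil, PySem.List.pyGetD_natCast,
      PySem.List.getD_map_range (par l) (m + 1) m 0 (Nat.lt_succ_self m),
      PySem.List.getD_map_range (fun k => 1 - par l k) (m + 1) m 0 (Nat.lt_succ_self m)]
    have h01 := par01 l m
    have hpar : par l (m + 1) = if l.getD m 0 = 0 then 1 - par l m else par l m := rfl
    rw [List.range_succ (n := m + 1), List.map_append, List.map_append]
    by_cases h : l.getD m 0 = 0
    · rw [if_pos h]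
      have hA : change (par l m) = par l (m + 1) := by
        rw [hpar, if_pos h, change]; rcases h01 with h1 | h1 <;> simp [h1]
      have hB : change (1 - par l m) = 1 - par l (m + 1) := by
        rw [hpar, if_pos h, change]; rcases h01 with h1 | h1 <;> simp [h1]
      simp [hA, hB]
    · rw [if_neg h]
      have hA : par l (m + 1) = par l m := by rw [hpar, if_neg h]
      simp [hA]

-- the second loop of A sums both sequences
theorem fold_sum (l : List Int) (m : Nat) (k : Nat) (hk : k ≤ m + 1) :
    (List.range k).foldl
      (fun (s : Int × Int) (i : Nat) =>
        (s.1 + PySem.List.pyGetD ((List.range (m + 1)).map (par l)) (i : Int) 0,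
         s.2 + PySem.List.pyGetD ((List.range (m + 1)).map (fun k => 1 - par l k)) (i : Int) 0))
      (0, 0)
    = (asum l k, (k : Int) - asum l k) := by
  induction k with
  | zero => rfl
  | succ k ih =>
    rw [List.range_succ (n := k), List.foldl_append, ih (by omega)]
    have hk' : k < m + 1 := by omega
    simp only [List.foldl_cons, List.foldl_nil, PySem.List.pyGetD_natCast,
      PySem.List.getD_map_range (par l) (m + 1) k 0 hk',
      PySem.List.getD_map_range (fun k => 1 - par l k) (m + 1) k 0 hk', asum]
    simp only [Prod.mk.injEq]
    exact ⟨trivial, by push_cast; ring⟩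

-- B's loop maintains (cur, a_sum) = (par (min k b), asum k), where b = n - 1 is the flip bound
theorem fold_alt (l : List Int) (b k : Nat) (hb : b = l.length - 1) (hk : k ≤ l.length) :
    (List.range k).foldl
      (fun (st : Int × Int) (j : Nat) =>
        (if j < b ∧ PySem.List.pyGetD l (j : Int) 0 = 0 then 1 - st.1 else st.1, st.2 + st.1))
      (0, 0)
    = (par l (min k b), asum l k) := by
  subst hb
  induction k with
  | zero => simp [par, asum]
  | succ k ih =>
    rw [List.range_succ (n := k), List.foldl_append, ih (by omega)]
    have hmin : min k (l.length - 1) = k := by omega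
    simp only [List.foldl_cons, List.foldl_nil, PySem.List.pyGetD_natCast, hmin]
    have hpar : par l (k + 1) = if l.getD k 0 = 0 then 1 - par l k else par l k := rfl
    by_cases h : k < l.length - 1
    · have hmin' : min (k + 1) (l.length - 1) = k + 1 := by omega
      rw [hmin']
      simp [h, hpar, asum]
    · have hk' : k = l.length - 1 := by omega
      have hmin' : min (k + 1) (l.length - 1) = k := by omega
      rw [hmin']
      simp [h, asum]

theorem how_many_knights_eq_alt (my_list : List Int) :
    how_many_knights my_list = how_many_knights_alt my_list := by
  cases my_list with
  | nil => decide
  | cons x xs =>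
    simp only [how_many_knights, how_many_knights_alt, List.length_cons, Nat.add_sub_cancel]
    rw [fold_build (x :: xs) xs.length]
    simp only [List.length_map, List.length_range]
    rw [fold_sum (x :: xs) xs.length (xs.length + 1) (le_refl _)]
    rw [fold_alt (x :: xs) xs.length (xs.length + 1) (by simp) (by simp)]
    dsimp only
    rw [min_def]
    split_ifs <;> omega

-- ===== VERDICT (by name: the statement is the Claim_ definition above) =====
theorem how_many_knights_spec : Claim_equal_how_many_knights := by
  intro my_list _
  unfold Spec_how_many_knights
  exact how_many_knights_eq_alt my_list
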